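-- pv_equiv track=rewrite | github.com/psycane/Python-modules-for-competitive-programming | Sum of maximum elements of sliding window of length K using fenwick tree.py | left_extents
-- ===== SOURCE A (Python) =====
-- def left_extents(lst):
--   result = []
--   stack = [-1]
--   for i in range(len(lst)):
--     while stack[-1] >= 0 and lst[i] >= lst[stack[-1]]:
--       del stack[-1]
--     result.append(stack[-1] + 1)
--     stack.append(i)
--   return result
-- ===== SOURCE B (Python) =====
-- def left_extents(lst):
--   result = []
--   for i in range(len(lst)):
--     j = i - 1
--     while j >= 0 and lst[j] <= lst[i]:
--       j = result[j] - 1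
--     result.append(j + 1)
--   return result
-- ===== Notes on version B (the rewrite author's own statement) =====
-- stated objective: alternative
-- what changed: Replaced the monotonic stack (pop while top's value is dominated, push every index) by jump-links: for each i, start at j=i-1 and follow j = result[j]-1 through the already-computed extents until a strictly greater element (or the left end), so no stack is kept.
import Mathlib
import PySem

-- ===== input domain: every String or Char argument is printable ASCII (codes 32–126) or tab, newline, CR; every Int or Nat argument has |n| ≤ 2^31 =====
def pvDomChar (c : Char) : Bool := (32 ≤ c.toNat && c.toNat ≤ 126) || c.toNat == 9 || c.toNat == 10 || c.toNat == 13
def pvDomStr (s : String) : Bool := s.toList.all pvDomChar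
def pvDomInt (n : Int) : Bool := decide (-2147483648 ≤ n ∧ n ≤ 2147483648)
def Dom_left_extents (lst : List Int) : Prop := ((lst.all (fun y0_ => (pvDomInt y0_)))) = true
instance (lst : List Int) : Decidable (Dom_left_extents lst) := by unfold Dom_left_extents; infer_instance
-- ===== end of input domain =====

-- B replaces A's monotonic stack by jump-links through the already-computed extents (no auxiliary stack; same amortized cost).

-- ===== PORT A =====
-- Python's `while stack[-1] >= 0 and lst[i] >= lst[stack[-1]]: del stack[-1]`.
-- The stack is represented top-first; `lst[t]` with 0 ≤ t < len(lst) is in range, so getD is exact.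
def pvPop (lst : List Int) (x : Int) : List Int → List Int
  | [] => []
  | t :: rest => if 0 ≤ t ∧ lst.getD t.toNat 0 ≤ x then pvPop lst x rest else t :: rest

def left_extents (lst : List Int) : List Int :=
  ((List.range lst.length).foldl
    (fun (st : List Int × List Int) i =>
      let s := pvPop lst (lst.getD i 0) st.2
      (st.1 ++ [s.headD (-1) + 1], (i : Int) :: s))
    ([], [-1])).1

-- ===== PORT B =====
-- Python's `j = i - 1; while j >= 0 and lst[j] <= lst[i]: j = result[j] - 1`.
-- The loop is total in Python (j strictly decreases: result[j] ≤ j); the fuel argument i only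
-- makes that totality explicit — jump_scan below proves fuel i always suffices, so the guard
-- never alters the computed value. Indices are in range, so getD is exact.
def pvJump (lst res : List Int) (x : Int) : Nat → Int → Int
  | 0, j => j
  | f + 1, j =>
    if 0 ≤ j ∧ lst.getD j.toNat 0 ≤ x then pvJump lst res x f (res.getD j.toNat 0 - 1) else j

def left_extents_alt (lst : List Int) : List Int :=
  (List.range lst.length).foldl
    (fun res i => res ++ [pvJump lst res (lst.getD i 0) i ((i : Int) - 1) + 1]) []

-- ===== PRECONDITION & SPEC =====
def Spec_left_extents (lst : List Int) (out : List Int) : Prop := out = left_extents_alt lst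
instance (lst : List Int) (out : List Int) : Decidable (Spec_left_extents lst out) := by unfold Spec_left_extents; infer_instance

-- ===== CLAIM (what is proved, stated in full; the proofs are below) =====
def Claim_equal_left_extents : Prop := ∀ (lst : List Int), Dom_left_extents lst → Spec_left_extents lst (left_extents lst)

-- ===== LEMMAS AND PROOFS =====

-- the specification value both programs compute: pvScan lst x i - 1 is the largest j < i with
-- lst[j] > x (or -1), found by a plain backward scan
def pvScan (lst : List Int) (x : Int) : Nat → Int
  | 0 => 0
  | k + 1 => if lst.getD k 0 ≤ x then pvScan lst x k else (k : Int) + 1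

-- j is "visible" from position i: every index strictly between j and i holds a smaller value.
def visB (lst : List Int) (i j : Nat) : Bool :=
  (List.range i).all (fun k => decide (k ≤ j) || decide (lst.getD k 0 < lst.getD j 0))

-- the indices visible from i, nearest (largest) first — A's stack above the -1 sentinel
def visL (lst : List Int) (i : Nat) : List Nat :=
  ((List.range i).filter (visB lst i)).reverse

lemma visL_mem {lst : List Int} {i j : Nat} (h : j ∈ visL lst i) :
    j < i ∧ visB lst i j = true := by
  unfold visL at h
  simp only [List.mem_reverse, List.mem_filter, List.mem_range] at h
  exact h

lemma visL_pairwise (lst : List Int) (i : Nat) : (visL lst i).Pairwise (· > ·) := by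
  unfold visL
  rw [List.pairwise_reverse]
  exact List.Pairwise.filter _ (List.pairwise_lt_range)

lemma pvPop_cons (lst : List Int) (x t : Int) (rest : List Int) :
    pvPop lst x (t :: rest)
      = if 0 ≤ t ∧ lst.getD t.toNat 0 ≤ x then pvPop lst x rest else t :: rest := rfl

lemma pvScan_succ (lst : List Int) (x : Int) (k : Nat) :
    pvScan lst x (k + 1) = if lst.getD k 0 ≤ x then pvScan lst x k else (k : Int) + 1 := rfl

lemma pop_filter (lst : List Int) (x : Int) (i : Nat) :
    ∀ L : List Nat, (∀ j ∈ L, j < i ∧ visB lst i j = true) → L.Pairwise (· > ·) →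
    pvPop lst x (L.map (Int.ofNat ·) ++ [-1])
      = (L.filter (fun j => decide (x < lst.getD j 0))).map (Int.ofNat ·) ++ [-1] := by
  intro L
  induction L with
  | nil => intro _ _; simp [pvPop]
  | cons j L ih =>
    intro hmem hpw
    rcases List.pairwise_cons.mp hpw with ⟨hgt, hpwL⟩
    have htn : (Int.ofNat j).toNat = j := rfl
    show pvPop lst x (Int.ofNat j :: (L.map (Int.ofNat ·) ++ [-1])) = _
    rw [pvPop_cons]
    by_cases hle : lst.getD j 0 ≤ x
    · rw [if_pos ⟨Int.natCast_nonneg j, by rw [htn]; exact hle⟩]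
      rw [List.filter_cons, if_neg (by simpa using not_lt.mpr hle)]
      exact ih (fun j' hj' => hmem j' (List.mem_cons_of_mem _ hj')) hpwL
    · rw [if_neg (fun h => hle (htn ▸ h.2))]
      have hle' : x < lst.getD j 0 := not_le.mp hle
      have hall : ∀ j' ∈ L, (fun j'' => decide (x < lst.getD j'' 0)) j' = true := by
        intro j' hj'
        have hj'lt : j' < j := hgt j' hj'
        obtain ⟨hji, _⟩ := hmem j List.mem_cons_self
        obtain ⟨_, hvis⟩ := hmem j' (List.mem_cons_of_mem _ hj')
        unfold visB at hvis
        rw [List.all_eq_true] at hvis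
        have := hvis j (List.mem_range.mpr hji)
        simp only [Bool.or_eq_true, decide_eq_true_eq] at this
        rcases this with h1 | h2
        · omega
        · simp only [decide_eq_true_eq]; exact lt_trans hle' h2
      rw [List.filter_cons, if_pos (by simpa using hle'), List.filter_eq_self.mpr hall]
      rfl

lemma visB_self (lst : List Int) (i : Nat) : visB lst (i + 1) i = true := by
  unfold visB
  rw [List.all_eq_true]
  intro k hk
  simp only [List.mem_range] at hk
  simp [Nat.lt_succ_iff.mp hk]

lemma visB_succ (lst : List Int) (i j : Nat) (hj : j < i) :
    visB lst (i + 1) j = (visB lst i j && decide (lst.getD i 0 < lst.getD j 0)) := by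
  unfold visB
  rw [List.range_succ, List.all_append]
  simp [Nat.not_le.mpr hj]

lemma visL_succ (lst : List Int) (i : Nat) :
    visL lst (i + 1) = i :: (visL lst i).filter (fun j => decide (lst.getD i 0 < lst.getD j 0)) := by
  unfold visL
  rw [List.range_succ, List.filter_append]
  rw [show List.filter (visB lst (i + 1)) [i] = [i] by simp [visB_self]]
  rw [List.reverse_append]
  simp only [List.reverse_cons, List.reverse_nil, List.nil_append, List.singleton_append]
  congr 1
  rw [List.filter_reverse]
  congr 1
  rw [List.filter_filter]
  apply List.filter_congr
  intro j hj
  rw [visB_succ lst i j (List.mem_range.mp hj), Bool.and_comm]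

lemma scan_head (lst : List Int) (x : Int) :
    ∀ i : Nat,
      (((visL lst i).filter (fun j => decide (x < lst.getD j 0))).map (Int.ofNat ·)
        ++ [-1]).headD (-1) + 1 = pvScan lst x i := by
  intro i
  induction i with
  | zero => simp [visL, pvScan]
  | succ i ih =>
    rw [visL_succ, List.filter_cons, pvScan_succ]
    by_cases hx : x < lst.getD i 0
    · rw [if_pos (decide_eq_true hx), if_neg (not_le.mpr hx)]
      simp
    · have hx' : lst.getD i 0 ≤ x := not_lt.mp hx
      rw [if_neg (by simpa using hx), if_pos hx', List.filter_filter]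
      rw [show List.filter (fun a => decide (x < lst.getD a 0) && decide (lst.getD i 0 < lst.getD a 0))
            (visL lst i) = List.filter (fun j => decide (x < lst.getD j 0)) (visL lst i) from ?_, ih]
      apply List.filter_congr
      intro j _
      by_cases hxj : x < lst.getD j 0
      · simp only [decide_eq_true hxj, decide_eq_true (lt_of_le_of_lt hx' hxj), Bool.and_self]
      · simp only [decide_eq_false hxj, Bool.false_and]

lemma fold_inv (lst : List Int) (i : Nat) :
    (List.range i).foldl
      (fun (st : List Int × List Int) i =>
        let s := pvPop lst (lst.getD i 0) st.2
        (st.1 ++ [s.headD (-1) + 1], (i : Int) :: s))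
      ([], [-1])
    = ((List.range i).map (fun k => pvScan lst (lst.getD k 0) k),
       (visL lst i).map (Int.ofNat ·) ++ [-1]) := by
  induction i with
  | zero => simp [visL]
  | succ i ih =>
    rw [List.range_succ, List.foldl_append, ih]
    simp only [List.foldl_cons, List.foldl_nil]
    have hpop := pop_filter lst (lst.getD i 0) i (visL lst i)
      (fun j hj => visL_mem hj) (visL_pairwise lst i)
    rw [hpop, List.map_append]
    simp only [List.map_cons, List.map_nil]
    rw [← scan_head lst (lst.getD i 0) i, visL_succ]
    rfl

lemma pvScan_bounds (lst : List Int) (y : Int) :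
    ∀ k : Nat, 0 ≤ pvScan lst y k ∧ pvScan lst y k ≤ (k : Int) := by
  intro k
  induction k with
  | zero => simp [pvScan]
  | succ k ih =>
    rw [pvScan_succ]
    by_cases h : lst.getD k 0 ≤ y
    · rw [if_pos h]; omega
    · rw [if_neg h]; omega

-- scanning for x from where a scan for a smaller key y stopped reaches the same place
lemma scan_scan (lst : List Int) (x y : Int) (hyx : y ≤ x) :
    ∀ k : Nat, pvScan lst x (pvScan lst y k).toNat = pvScan lst x k := by
  intro k
  induction k with
  | zero => simp [pvScan]
  | succ k ih =>
    rw [pvScan_succ lst y k]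
    by_cases h : lst.getD k 0 ≤ y
    · rw [if_pos h, ih, pvScan_succ, if_pos (le_trans h hyx)]
    · rw [if_neg h]
      have : ((k : Int) + 1).toNat = k + 1 := by omega
      rw [this]

-- following jump-links through the already-computed extents lands exactly where the scan does
lemma jump_scan (lst : List Int) (i : Nat) (x : Int) :
    ∀ k : Nat, k ≤ i → ∀ f : Nat, k ≤ f →
      pvJump lst ((List.range i).map (fun t => pvScan lst (lst.getD t 0) t)) x f ((k : Int) - 1)
        = pvScan lst x k - 1 := by
  intro k
  induction k using Nat.strong_induction_on with
  | _ k IH =>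
    intro hki f hkf
    match k, f with
    | 0, 0 => simp [pvJump, pvScan]
    | 0, f + 1 =>
        have : ((0 : Nat) : Int) - 1 = -1 := by omega
        rw [this, pvJump]
        rw [if_neg (by omega)]
        simp [pvScan]
    | k + 1, f + 1 =>
        have hc : ((k + 1 : Nat) : Int) - 1 = (k : Int) := by push_cast; omega
        rw [hc, pvJump]
        have htn : ((k : Int)).toNat = k := by omega
        by_cases h : lst.getD k 0 ≤ x
        · rw [if_pos ⟨Int.natCast_nonneg k, by rw [htn]; exact h⟩, htn]
          rw [PySem.List.getD_map_range _ _ _ _ (by omega)]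
          obtain ⟨hm0, hmk⟩ := pvScan_bounds lst (lst.getD k 0) k
          set m : Nat := (pvScan lst (lst.getD k 0) k).toNat with hm
          have hcast : pvScan lst (lst.getD k 0) k = (m : Int) := by omega
          rw [hcast]
          have hmle : m ≤ k := by omega
          rw [IH m (by omega) (by omega) f (by omega)]
          rw [scan_scan lst x (lst.getD k 0) h k, pvScan_succ, if_pos h]
        · rw [if_neg (by rw [htn]; exact fun hh => h hh.2)]
          rw [pvScan_succ, if_neg h]
          omega

lemma alt_inv (lst : List Int) (i : Nat) :
    (List.range i).foldl
      (fun res i => res ++ [pvJump lst res (lst.getD i 0) i ((i : Int) - 1) + 1]) []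
    = (List.range i).map (fun k => pvScan lst (lst.getD k 0) k) := by
  induction i with
  | zero => simp
  | succ i ih =>
    rw [List.range_succ, List.foldl_append, ih]
    simp only [List.foldl_cons, List.foldl_nil]
    rw [jump_scan lst i (lst.getD i 0) i le_rfl i le_rfl]
    rw [List.map_append]
    simp only [List.map_cons, List.map_nil]
    congr 1
    congr 1
    omega

-- ===== VERDICT (by name: the statement is the Claim_ definition above) =====
theorem left_extents_spec : Claim_equal_left_extents := by
  intro lst _
  unfold Spec_left_extents left_extents left_extents_alt
  rw [fold_inv, alt_inv]
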